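/-
  GENERATED by c/gen_symbols.py from c/vorbis_f.sym — do not edit; re-run the script when the image is re-linked.

  `Symbols`: one number per symbol of the image. `symbols`: this build. `Symbols.rt`: the runtime's entry points as the
  parameter record of Asan/Runtime.lean. `Symbols.image`: M5's `Image` for given file bytes.
-/
import Asan.Runtime
import Vorbis.Start
namespace Vorbis

/-- The symbols of the image (`nm`): functions, named objects, section marks. -/
structure Symbols where
  /-- `__text_start`: function -/
  text_start : Nat
  /-- `_start_vorbis`: function, 89 bytes -/
  start_vorbis : Nat
  /-- `vorbis_exit`: function -/
  vorbis_exit : Nat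
  /-- `__asan_report`: function, 64 bytes -/
  asan_report : Nat
  /-- `vorbis_reported`: function -/
  vorbis_reported : Nat
  /-- `range_bad`: function (static), 105 bytes -/
  range_bad : Nat
  /-- `__asan_load1_noabort`: function, 56 bytes -/
  asan_load1_noabort : Nat
  /-- `__asan_store1_noabort`: function, 56 bytes -/
  asan_store1_noabort : Nat
  /-- `__asan_load2_noabort`: function, 79 bytes -/
  asan_load2_noabort : Nat
  /-- `__asan_store2_noabort`: function, 79 bytes -/
  asan_store2_noabort : Nat
  /-- `__asan_load4_noabort`: function, 79 bytes -/
  asan_load4_noabort : Nat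
  /-- `__asan_store4_noabort`: function, 79 bytes -/
  asan_store4_noabort : Nat
  /-- `__asan_load8_noabort`: function, 79 bytes -/
  asan_load8_noabort : Nat
  /-- `__asan_store8_noabort`: function, 79 bytes -/
  asan_store8_noabort : Nat
  /-- `__asan_load16_noabort`: function, 38 bytes -/
  asan_load16_noabort : Nat
  /-- `__asan_store16_noabort`: function, 38 bytes -/
  asan_store16_noabort : Nat
  /-- `__asan_storeN_noabort`: function, 50 bytes -/
  asan_storeN_noabort : Nat
  /-- `arena_unpoison`: function, 40 bytes -/
  arena_unpoison : Nat
  /-- `arena_poison`: function, 27 bytes -/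
  arena_poison : Nat
  /-- `__asan_register_globals`: function, 97 bytes -/
  asan_register_globals : Nat
  /-- `run_ctors`: function, 25 bytes -/
  run_ctors : Nat
  /-- `swap_bytes`: function (static), 102 bytes -/
  swap_bytes : Nat
  /-- `sift_down`: function (static), 156 bytes -/
  sift_down : Nat
  /-- `memcpy`: function, 91 bytes -/
  memcpy : Nat
  /-- `memset`: function, 61 bytes -/
  memset : Nat
  /-- `memcmp`: function, 109 bytes -/
  memcmp : Nat
  /-- `abs`: function, 11 bytes -/
  abs : Nat
  /-- `malloc`: function, 6 bytes -/
  malloc : Nat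
  /-- `free`: function, 1 bytes -/
  free : Nat
  /-- `qsort`: function, 131 bytes -/
  qsort : Nat
  /-- `two_to`: function (static), 16 bytes -/
  two_to : Nat
  /-- `pow_int`: function (static), 37 bytes -/
  pow_int : Nat
  /-- `sin_poly`: function (static), 225 bytes -/
  sin_poly : Nat
  /-- `cos_poly`: function (static), 221 bytes -/
  cos_poly : Nat
  /-- `ldexp`: function, 186 bytes -/
  ldexp : Nat
  /-- `floor`: function, 62 bytes -/
  floor : Nat
  /-- `sincos_quadrant`: function (static), 190 bytes -/
  sincos_quadrant : Nat
  /-- `exp`: function, 420 bytes -/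
  exp : Nat
  /-- `log`: function, 443 bytes -/
  log : Nat
  /-- `pow`: function, 136 bytes -/
  pow : Nat
  /-- `sin`: function, 11 bytes -/
  sin : Nat
  /-- `cos`: function, 11 bytes -/
  cos : Nat
  /-- `copy_frame`: function (static), 172 bytes -/
  copy_frame : Nat
  /-- `put_header`: function (static), 155 bytes -/
  put_header : Nat
  /-- `decode_all`: function, 497 bytes -/
  decode_all : Nat
  /-- `_sub_I_65535_1`: function (static), 24 bytes -/
  sub_I_65535_1 : Nat
  /-- `error`: function (static), 41 bytes -/
  error : Nat
  /-- `make_block_array`: function (static), 89 bytes -/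
  make_block_array : Nat
  /-- `crc32_init`: function (static), 92 bytes -/
  crc32_init : Nat
  /-- `bit_reverse`: function (static), 86 bytes -/
  bit_reverse : Nat
  /-- `square`: function (static), 5 bytes -/
  square : Nat
  /-- `ilog`: function (static), 270 bytes -/
  ilog : Nat
  /-- `add_entry`: function (static), 189 bytes -/
  add_entry : Nat
  /-- `compute_accelerated_huffman`: function (static), 321 bytes -/
  compute_accelerated_huffman : Nat
  /-- `uint32_compare`: function (static), 56 bytes -/
  uint32_compare : Nat
  /-- `include_in_sort`: function (static), 71 bytes -/
  include_in_sort : Nat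
  /-- `compute_bitreverse`: function (static), 106 bytes -/
  compute_bitreverse : Nat
  /-- `neighbors`: function (static), 220 bytes -/
  neighbors : Nat
  /-- `point_compare`: function (static), 60 bytes -/
  point_compare : Nat
  /-- `get8`: function (static), 93 bytes -/
  get8 : Nat
  /-- `get32`: function (static), 65 bytes -/
  get32 : Nat
  /-- `skip`: function (static), 105 bytes -/
  skip : Nat
  /-- `capture_pattern`: function (static), 84 bytes -/
  capture_pattern : Nat
  /-- `imdct_step3_iter0_loop`: function (static), 934 bytes -/
  imdct_step3_iter0_loop : Nat
  /-- `imdct_step3_inner_r_loop`: function (static), 977 bytes -/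
  imdct_step3_inner_r_loop : Nat
  /-- `imdct_step3_inner_s_loop`: function (static), 980 bytes -/
  imdct_step3_inner_s_loop : Nat
  /-- `iter_54`: function (static), 321 bytes -/
  iter_54 : Nat
  /-- `imdct_step3_inner_s_loop_ld654`: function (static), 767 bytes -/
  imdct_step3_inner_s_loop_ld654 : Nat
  /-- `get_window`: function (static), 106 bytes -/
  get_window : Nat
  /-- `vorbis_finish_frame`: function (static), 582 bytes -/
  vorbis_finish_frame : Nat
  /-- `setup_free`: function (static), 45 bytes -/
  setup_free : Nat
  /-- `vorbis_deinit`: function (static), 1181 bytes -/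
  vorbis_deinit : Nat
  /-- `getn`: function (static), 123 bytes -/
  getn : Nat
  /-- `vorbis_init`: function (static), 207 bytes -/
  vorbis_init : Nat
  /-- `compute_codewords`: function (static), 587 bytes -/
  compute_codewords : Nat
  /-- `predict_point`: function (static), 66 bytes -/
  predict_point : Nat
  /-- `draw_line`: function (static), 325 bytes -/
  draw_line : Nat
  /-- `do_floor`: function (static), 507 bytes -/
  do_floor : Nat
  /-- `setup_temp_malloc`: function (static), 246 bytes -/
  setup_temp_malloc : Nat
  /-- `setup_malloc`: function (static), 253 bytes -/
  setup_malloc : Nat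
  /-- `vorbis_alloc`: function (static), 19 bytes -/
  vorbis_alloc : Nat
  /-- `arena_temp_restore`: function (static), 99 bytes -/
  arena_temp_restore : Nat
  /-- `inverse_mdct`: function (static), 3951 bytes -/
  inverse_mdct : Nat
  /-- `setup_temp_free`: function (static), 86 bytes -/
  setup_temp_free : Nat
  /-- `compute_sorted_huffman`: function (static), 896 bytes -/
  compute_sorted_huffman : Nat
  /-- `vorbis_validate`: function (static), 32 bytes -/
  vorbis_validate : Nat
  /-- `float32_unpack`: function (static), 88 bytes -/
  float32_unpack : Nat
  /-- `lookup1_values`: function (static), 278 bytes -/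
  lookup1_values : Nat
  /-- `compute_twiddle_factors`: function (static), 543 bytes -/
  compute_twiddle_factors : Nat
  /-- `compute_window`: function (static), 144 bytes -/
  compute_window : Nat
  /-- `init_blocksize`: function (static), 466 bytes -/
  init_blocksize : Nat
  /-- `stb_vorbis_close`: function, 28 bytes -/
  stb_vorbis_close : Nat
  /-- `stb_vorbis_get_error`: function, 34 bytes -/
  stb_vorbis_get_error : Nat
  /-- `stb_vorbis_get_file_offset`: function, 43 bytes -/
  stb_vorbis_get_file_offset : Nat
  /-- `start_page_no_capturepattern`: function (static), 540 bytes -/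
  start_page_no_capturepattern : Nat
  /-- `start_page`: function (static), 38 bytes -/
  start_page : Nat
  /-- `next_segment`: function (static), 339 bytes -/
  next_segment : Nat
  /-- `get8_packet_raw`: function (static), 128 bytes -/
  get8_packet_raw : Nat
  /-- `get8_packet`: function (static), 47 bytes -/
  get8_packet : Nat
  /-- `get32_packet`: function (static), 62 bytes -/
  get32_packet : Nat
  /-- `get_bits`: function (static), 310 bytes -/
  get_bits : Nat
  /-- `prep_huffman`: function (static), 187 bytes -/
  prep_huffman : Nat
  /-- `codebook_decode_scalar_raw`: function (static), 803 bytes -/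
  codebook_decode_scalar_raw : Nat
  /-- `codebook_decode_deinterleave_repeat`: function (static), 947 bytes -/
  codebook_decode_deinterleave_repeat : Nat
  /-- `codebook_decode_start`: function (static), 334 bytes -/
  codebook_decode_start : Nat
  /-- `codebook_decode_step`: function (static), 236 bytes -/
  codebook_decode_step : Nat
  /-- `codebook_decode`: function (static), 347 bytes -/
  codebook_decode : Nat
  /-- `residue_decode`: function (static), 199 bytes -/
  residue_decode : Nat
  /-- `decode_residue`: function (static), 3884 bytes -/
  decode_residue : Nat
  /-- `flush_packet`: function (static), 19 bytes -/
  flush_packet : Nat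
  /-- `vorbis_decode_packet_rest`: function (static), 4431 bytes -/
  vorbis_decode_packet_rest : Nat
  /-- `start_packet`: function (static), 165 bytes -/
  start_packet : Nat
  /-- `maybe_start_packet`: function (static), 295 bytes -/
  maybe_start_packet : Nat
  /-- `vorbis_decode_initial`: function (static), 634 bytes -/
  vorbis_decode_initial : Nat
  /-- `vorbis_decode_packet`: function (static), 235 bytes -/
  vorbis_decode_packet : Nat
  /-- `vorbis_pump_first_frame`: function (static), 154 bytes -/
  vorbis_pump_first_frame : Nat
  /-- `start_decoder`: function (static), 12029 bytes -/
  start_decoder : Nat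
  /-- `stb_vorbis_get_frame_float`: function, 437 bytes -/
  stb_vorbis_get_frame_float : Nat
  /-- `stb_vorbis_open_memory`: function, 427 bytes -/
  stb_vorbis_open_memory : Nat
  /-- `__text_end`: function -/
  text_end : Nat
  /-- `__rodata_start`: read-only mark / object -/
  rodata_start : Nat
  /-- `range_list.1`: read-only object (static), 16 bytes -/
  range_list_1 : Nat
  /-- `log2_4.2`: read-only object (static), 16 bytes -/
  log2_4_2 : Nat
  /-- `inverse_db_table`: read-only object (static), 1024 bytes -/
  inverse_db_table : Nat
  /-- `ogg_page_header`: read-only object (static), 4 bytes -/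
  ogg_page_header : Nat
  /-- `__rodata_end`: read-only mark / object -/
  rodata_end : Nat
  /-- `__init_array_start`: data mark / object -/
  init_array_start : Nat
  /-- `__init_array_end`: data mark / object -/
  init_array_end : Nat
  /-- `__data_start`: data mark / object -/
  data_start : Nat
  /-- `vorbis.0`: data object (static), 6 bytes -/
  vorbis_0 : Nat
  /-- `__data_end`: data mark / object -/
  data_end : Nat
  /-- `__bss_start`: bss mark / object -/
  bss_start : Nat
  /-- `crc_table`: bss object (static), 1024 bytes -/
  crc_table : Nat
  /-- `__bss_end`: bss mark / object -/
  bss_end : Nat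
  /-- `__image_end`: bss mark / object -/
  image_end : Nat

/-- The addresses of this build (c/vorbis_f.sym). -/
def symbols : Symbols where
  text_start := 0x100000
  start_vorbis := 0x100000
  vorbis_exit := 0x100056
  asan_report := 0x100059
  vorbis_reported := 0x100096
  range_bad := 0x100200
  asan_load1_noabort := 0x100300
  asan_store1_noabort := 0x1003c0
  asan_load2_noabort := 0x100480
  asan_store2_noabort := 0x100560
  asan_load4_noabort := 0x100640
  asan_store4_noabort := 0x100720
  asan_load8_noabort := 0x100800
  asan_store8_noabort := 0x1008e0
  asan_load16_noabort := 0x1009c0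
  asan_store16_noabort := 0x100a80
  asan_storeN_noabort := 0x100b40
  arena_unpoison := 0x100c00
  arena_poison := 0x100cc0
  asan_register_globals := 0x100d60
  run_ctors := 0x100e60
  swap_bytes := 0x101200
  sift_down := 0x101300
  memcpy := 0x101440
  memset := 0x101520
  memcmp := 0x1015e0
  abs := 0x1016e0
  malloc := 0x101780
  free := 0x101820
  qsort := 0x1018c0
  two_to := 0x101d00
  pow_int := 0x101da0
  sin_poly := 0x101e60
  cos_poly := 0x102040
  ldexp := 0x102200
  floor := 0x102380
  sincos_quadrant := 0x102440
  exp := 0x1025c0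
  log := 0x102920
  pow := 0x102ca0
  sin := 0x102dc0
  cos := 0x102e60
  copy_frame := 0x103200
  put_header := 0x103360
  decode_all := 0x1034a0
  sub_I_65535_1 := 0x1038a0
  error := 0x103d00
  make_block_array := 0x103dc0
  crc32_init := 0x103ea0
  bit_reverse := 0x103f80
  square := 0x104060
  ilog := 0x104100
  add_entry := 0x104320
  compute_accelerated_huffman := 0x1044a0
  uint32_compare := 0x104740
  include_in_sort := 0x104800
  compute_bitreverse := 0x1048e0
  neighbors := 0x1049e0
  point_compare := 0x104ba0
  get8 := 0x104c60
  get32 := 0x104d40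
  skip := 0x104e20
  capture_pattern := 0x104f00
  imdct_step3_iter0_loop := 0x104fe0
  imdct_step3_inner_r_loop := 0x105740
  imdct_step3_inner_s_loop := 0x105f00
  iter_54 := 0x1066c0
  imdct_step3_inner_s_loop_ld654 := 0x106960
  get_window := 0x106f60
  vorbis_finish_frame := 0x107060
  setup_free := 0x107500
  vorbis_deinit := 0x1075c0
  getn := 0x107f00
  vorbis_init := 0x108000
  compute_codewords := 0x1081a0
  predict_point := 0x108640
  draw_line := 0x108720
  do_floor := 0x1089c0
  setup_temp_malloc := 0x108dc0
  setup_malloc := 0x108f20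
  vorbis_alloc := 0x109080
  arena_temp_restore := 0x109120
  inverse_mdct := 0x109220
  setup_temp_free := 0x10b100
  compute_sorted_huffman := 0x10b1e0
  vorbis_validate := 0x10b8e0
  float32_unpack := 0x10b980
  lookup1_values := 0x10ba60
  compute_twiddle_factors := 0x10bc40
  compute_window := 0x10c080
  init_blocksize := 0x10c1a0
  stb_vorbis_close := 0x10c560
  stb_vorbis_get_error := 0x10c600
  stb_vorbis_get_file_offset := 0x10c6c0
  start_page_no_capturepattern := 0x10c780
  start_page := 0x10cbc0
  next_segment := 0x10cc80
  get8_packet_raw := 0x10cf40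
  get8_packet := 0x10d040
  get32_packet := 0x10d100
  get_bits := 0x10d1c0
  prep_huffman := 0x10d440
  codebook_decode_scalar_raw := 0x10d5c0
  codebook_decode_deinterleave_repeat := 0x10dbc0
  codebook_decode_start := 0x10e320
  codebook_decode_step := 0x10e5c0
  codebook_decode := 0x10e7a0
  residue_decode := 0x10ea60
  decode_residue := 0x10ec00
  flush_packet := 0x110a60
  vorbis_decode_packet_rest := 0x110b00
  start_packet := 0x112da0
  maybe_start_packet := 0x112f00
  vorbis_decode_initial := 0x113160
  vorbis_decode_packet := 0x113660
  vorbis_pump_first_frame := 0x113840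
  start_decoder := 0x113980
  stb_vorbis_get_frame_float := 0x1196c0
  stb_vorbis_open_memory := 0x119a40
  text_end := 0x119d40
  rodata_start := 0x120000
  range_list_1 := 0x120600
  log2_4_2 := 0x120640
  inverse_db_table := 0x120680
  ogg_page_header := 0x120ac0
  rodata_end := 0x121040
  init_array_start := 0x121500
  init_array_end := 0x121508
  data_start := 0x121600
  vorbis_0 := 0x121600
  data_end := 0x121940
  bss_start := 0x121c00
  crc_table := 0x121c00
  bss_end := 0x122040
  image_end := 0x122040

/-- The runtime's entry points, for the contracts of Asan/Runtime.lean. -/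
def Symbols.rt (S : Symbols) : Asan.RtSymbols where
  report := UInt64.ofNat S.asan_report
  rangeBad := UInt64.ofNat S.range_bad
  load1 := UInt64.ofNat S.asan_load1_noabort
  store1 := UInt64.ofNat S.asan_store1_noabort
  load2 := UInt64.ofNat S.asan_load2_noabort
  store2 := UInt64.ofNat S.asan_store2_noabort
  load4 := UInt64.ofNat S.asan_load4_noabort
  store4 := UInt64.ofNat S.asan_store4_noabort
  load8 := UInt64.ofNat S.asan_load8_noabort
  store8 := UInt64.ofNat S.asan_store8_noabort
  load16 := UInt64.ofNat S.asan_load16_noabort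
  store16 := UInt64.ofNat S.asan_store16_noabort
  storeN := UInt64.ofNat S.asan_storeN_noabort
  arenaUnpoison := UInt64.ofNat S.arena_unpoison
  arenaPoison := UInt64.ofNat S.arena_poison
  registerGlobals := UInt64.ofNat S.asan_register_globals
  ctor := UInt64.ofNat S.sub_I_65535_1
  runCtors := UInt64.ofNat S.run_ctors
  initArrayStart := S.init_array_start
  initArrayEnd := S.init_array_end

/-- The `Image` of Vorbis/Start.lean for the file bytes `bytes` (vorbis_f.bin) and these symbols. -/
def Symbols.image (S : Symbols) (bytes : Array UInt8) : Image where
  bytes := bytes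
  imageEnd := S.image_end
  textEnd := S.text_end
  entry := UInt64.ofNat S.start_vorbis
  exit := UInt64.ofNat S.vorbis_exit
  report := UInt64.ofNat S.asan_report

end Vorbis
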